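-- pv_equiv track=rewrite | github.com/Remnan13/codewars | python3/comfy_words.py | comfortable_word
-- ===== SOURCE A (Python) =====
-- def comfortable_word(word):
--   left_letters = ['q', 'w', 'e', 'r', 't', 'a', 's', 'd', 'f', 'g', 'z', 'x', 'c', 'v', 'b']
--   right_letters = ['y', 'u', 'i', 'o', 'p', 'h', 'j', 'k', 'l', 'n', 'm']
--   count = 0
--   comfy = True
--   for letter in range(len(word)):
--       if count == len(word)-1:
--           return comfy
--       if word[count] in left_letters and word[count+1] in left_letters:
--           return False
--       if word[count] in right_letters and word[count+1] in right_letters: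
--           return False
--       else:
--           comfy = True
--       count += 1
--   return comfy
-- ===== SOURCE B (Python) =====
-- HAND = {c: 'L' for c in 'qwertasdfgzxcvb'}
-- HAND.update({c: 'R' for c in 'yuiophjklnm'})
--
--
-- def comfortable_word(word):
--     labels = ''.join(HAND.get(c, '-') for c in word)
--     return 'LL' not in labels and 'RR' not in labels
-- ===== Notes on version B (the rewrite author's own statement) =====
-- stated objective: alternative
-- what changed: B replaces A's index/counter loop with per-pair double list-membership tests by a staged pipeline: translate the word through a hand dict into a label string, then answer with two substring tests ('LL' not in labels and 'RR' not in labels).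
import Mathlib
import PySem

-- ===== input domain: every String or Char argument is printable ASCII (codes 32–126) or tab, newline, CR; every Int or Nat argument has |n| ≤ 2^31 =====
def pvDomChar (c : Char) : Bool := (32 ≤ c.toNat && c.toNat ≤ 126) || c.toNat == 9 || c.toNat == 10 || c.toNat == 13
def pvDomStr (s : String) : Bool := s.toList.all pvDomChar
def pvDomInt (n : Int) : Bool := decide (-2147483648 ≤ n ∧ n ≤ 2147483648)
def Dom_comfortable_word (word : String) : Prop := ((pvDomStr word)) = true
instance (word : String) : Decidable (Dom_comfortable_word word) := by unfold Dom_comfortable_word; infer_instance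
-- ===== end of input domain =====

-- B replaces A's index/counter pair-comparison loop by a staged pipeline: translate the word to a
-- hand-label string via a dict, then test it for the substrings "LL" and "RR"; same return value.

-- ===== PORT A =====
def cwLeft : List Char := ['q','w','e','r','t','a','s','d','f','g','z','x','c','v','b']
def cwRight : List Char := ['y','u','i','o','p','h','j','k','l','n','m']

-- A's loop: `iters` = remaining iterations of `for letter in range(len(word))`; word[count] and
-- word[count+1] via pyGet?: the `count == len-1` return fires before the index can leave range,
-- so the `.getD ' '` default is unreachable (A never raises IndexError).
def cwLoopA (cs : List Char) : Nat → Int → Bool → Bool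
  | 0, _, comfy => comfy
  | n+1, count, comfy =>
    if count = (cs.length : Int) - 1 then comfy
    else if cwLeft.contains ((PySem.List.pyGet? cs count).getD ' ') &&
            cwLeft.contains ((PySem.List.pyGet? cs (count+1)).getD ' ') then false
    else if cwRight.contains ((PySem.List.pyGet? cs count).getD ' ') &&
            cwRight.contains ((PySem.List.pyGet? cs (count+1)).getD ' ') then false
    else cwLoopA cs n (count+1) true

def comfortable_word (word : String) : Bool :=
  cwLoopA word.toList word.toList.length 0 true

-- ===== PORT B =====
-- Source B's module-level HAND dict: {c:'L' for c in left} updated with {c:'R' for c in right}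
def cwHAND : PySem.Dict Char Char :=
  PySem.Dict.update (PySem.Dict.ofList (cwLeft.map (fun c => (c, 'L'))))
    (cwRight.map (fun c => (c, 'R')))

def comfortable_word_alt (word : String) : Bool :=
  let labels := String.ofList (word.toList.map (fun c => PySem.Dict.getD cwHAND c '-'))
  !(PySem.Str.isIn "LL" labels) && !(PySem.Str.isIn "RR" labels)

-- ===== PRECONDITION & SPEC =====
def Spec_comfortable_word (word : String) (out : Bool) : Prop := out = comfortable_word_alt word
instance (word : String) (out : Bool) : Decidable (Spec_comfortable_word word out) := by unfold Spec_comfortable_word; infer_instance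

-- ===== CLAIM (what is proved, stated in full; the proofs are below) =====
def Claim_equal_comfortable_word : Prop := ∀ (word : String), Dom_comfortable_word word → Spec_comfortable_word word (comfortable_word word)

-- ===== LEMMAS AND PROOFS =====
-- spec view of the label of one character
def cwHandC (c : Char) : Char :=
  if c ∈ cwLeft then 'L' else if c ∈ cwRight then 'R' else '-'

-- pair scan used only as the common middle form of the proof
def cwScan : List Char → Bool
  | x :: y :: r => if (x == 'L' && y == 'L') || (x == 'R' && y == 'R') then false else cwScan (y :: r)
  | _ => true

set_option maxRecDepth 10000 in
theorem cw_disj (c : Char) (h : cwLeft.contains c = true) : cwRight.contains c = false := by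
  have hm : c ∈ cwLeft := by simpa using h
  simp only [cwLeft, List.mem_cons, List.not_mem_nil, or_false] at hm
  rcases hm with h|h|h|h|h|h|h|h|h|h|h|h|h|h|h <;> subst h <;> decide

theorem cw_disj' (c : Char) (h : c ∈ cwLeft) : c ∉ cwRight := by
  intro hr
  have := cw_disj c (by simpa using h)
  simp [List.contains_eq_mem] at this
  exact this hr

set_option maxRecDepth 10000 in
theorem cw_hand_eq (c : Char) : PySem.Dict.getD cwHAND c '-' = cwHandC c := by
  unfold cwHandC
  by_cases hL : c ∈ cwLeft
  · rw [if_pos hL]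
    simp only [cwLeft, List.mem_cons, List.not_mem_nil, or_false] at hL
    rcases hL with rfl|rfl|rfl|rfl|rfl|rfl|rfl|rfl|rfl|rfl|rfl|rfl|rfl|rfl|rfl <;> decide
  · rw [if_neg hL]
    by_cases hR : c ∈ cwRight
    · rw [if_pos hR]
      simp only [cwRight, List.mem_cons, List.not_mem_nil, or_false] at hR
      rcases hR with rfl|rfl|rfl|rfl|rfl|rfl|rfl|rfl|rfl|rfl|rfl <;> decide
    · rw [if_neg hR]
      apply PySem.Dict.getD_of_not_contains
      have h : cwHAND = PySem.Dict.mk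
          [('q','L'),('w','L'),('e','L'),('r','L'),('t','L'),('a','L'),('s','L'),('d','L'),
           ('f','L'),('g','L'),('z','L'),('x','L'),('c','L'),('v','L'),('b','L'),
           ('y','R'),('u','R'),('i','R'),('o','R'),('p','R'),('h','R'),('j','R'),('k','R'),
           ('l','R'),('n','R'),('m','R')] := by rfl
      rw [h, PySem.Dict.contains_mk]
      simp only [cwLeft, cwRight, List.mem_cons, List.not_mem_nil, or_false, not_or] at hL hR
      simp only [List.any_cons, List.any_nil, Bool.or_eq_false_iff, beq_eq_false_iff_ne, ne_eq]
      refine ⟨?_,?_,?_,?_,?_,?_,?_,?_,?_,?_,?_,?_,?_,?_,?_,?_,?_,?_,?_,?_,?_,?_,?_,?_,?_,?_,trivial⟩ <;>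
        (intro he; subst he; simp_all)

theorem cwScan_false_iff (l : List Char) :
    cwScan l = false ↔ (['L','L'] <:+: l ∨ ['R','R'] <:+: l) := by
  induction l with
  | nil => simp [cwScan]
  | cons a t ih =>
    cases t with
    | nil =>
      simp [cwScan, List.infix_cons_iff, List.cons_prefix_cons]
    | cons b r =>
      have step : cwScan (a :: b :: r) =
          if (a == 'L' && b == 'L') || (a == 'R' && b == 'R') then false
          else cwScan (b :: r) := rfl
      have hinf : ∀ x : Char, ([x,x] <:+: a :: b :: r) ↔ ((x = a ∧ x = b) ∨ [x,x] <:+: b :: r) := by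
        intro x
        rw [List.infix_cons_iff, List.cons_prefix_cons, List.cons_prefix_cons]
        simp
      rw [step, hinf, hinf]
      by_cases hc : ((a == 'L' && b == 'L') || (a == 'R' && b == 'R')) = true
      · rw [if_pos hc]
        simp only [Bool.or_eq_true, Bool.and_eq_true, beq_iff_eq] at hc
        constructor
        · intro _
          rcases hc with ⟨h1,h2⟩|⟨h1,h2⟩
          · exact Or.inl (Or.inl ⟨h1.symm, h2.symm⟩)
          · exact Or.inr (Or.inl ⟨h1.symm, h2.symm⟩)
        · intro _; rfl
      · rw [if_neg hc]
        simp only [Bool.or_eq_true, Bool.and_eq_true, beq_iff_eq, not_or, not_and] at hc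
        rw [ih]
        constructor
        · intro h; tauto
        · rintro ((⟨h1,h2⟩|h)|(⟨h1,h2⟩|h))
          · exact absurd h2.symm (hc.1 h1.symm)
          · exact Or.inl h
          · exact absurd h2.symm (hc.2 h1.symm)
          · exact Or.inr h

theorem cw_alt_eq_scan (word : String) :
    comfortable_word_alt word = cwScan (word.toList.map cwHandC) := by
  unfold comfortable_word_alt
  have hmap : word.toList.map (fun c => PySem.Dict.getD cwHAND c '-') = word.toList.map cwHandC :=
    List.map_congr_left (fun c _ => cw_hand_eq c)
  rw [hmap]
  set l := word.toList.map cwHandC with hl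
  have hLL : PySem.Str.isIn "LL" (String.ofList l) = true ↔ ['L','L'] <:+: l := by
    rw [PySem.Str.isIn_iff_infix]; simp
  have hRR : PySem.Str.isIn "RR" (String.ofList l) = true ↔ ['R','R'] <:+: l := by
    rw [PySem.Str.isIn_iff_infix]; simp
  cases h1 : PySem.Str.isIn "LL" (String.ofList l) <;>
    cases h2 : PySem.Str.isIn "RR" (String.ofList l)
  · cases hs : cwScan l
    · rcases (cwScan_false_iff l).mp hs with h | h
      · rw [hLL.mpr h] at h1; exact absurd h1 (by simp)
      · rw [hRR.mpr h] at h2; exact absurd h2 (by simp)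
    · simp at h1 h2 ⊢; simp_all
  · rw [(cwScan_false_iff l).mpr (Or.inr (hRR.mp h2))]; simp at h1 h2 ⊢; simp_all
  · rw [(cwScan_false_iff l).mpr (Or.inl (hLL.mp h1))]; simp at h1 h2 ⊢; simp_all
  · rw [(cwScan_false_iff l).mpr (Or.inl (hLL.mp h1))]; simp at h1 h2 ⊢; simp_all

theorem cwLoopA_step (cs : List Char) (n : Nat) (count : Int) (comfy : Bool) :
    cwLoopA cs (n+1) count comfy =
    (if count = (cs.length : Int) - 1 then comfy
     else if cwLeft.contains ((PySem.List.pyGet? cs count).getD ' ') &&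
             cwLeft.contains ((PySem.List.pyGet? cs (count+1)).getD ' ') then false
     else if cwRight.contains ((PySem.List.pyGet? cs count).getD ' ') &&
             cwRight.contains ((PySem.List.pyGet? cs (count+1)).getD ' ') then false
     else cwLoopA cs n (count+1) true) := rfl

theorem cw_key (suf : List Char) : ∀ pre : List Char,
    cwLoopA (pre ++ suf) suf.length (pre.length : Int) true = cwScan (suf.map cwHandC) := by
  induction suf with
  | nil => intro pre; simp [cwLoopA, cwScan]
  | cons a t ih =>
    intro pre
    cases t with
    | nil =>
      rw [show ([a] : List Char).length = 0 + 1 from rfl, cwLoopA_step]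
      have : (pre.length : Int) = ((pre ++ [a]).length : Int) - 1 := by simp
      rw [if_pos this]; simp [cwScan]
    | cons b r =>
      rw [show (a::b::r).length = (r.length + 1) + 1 from rfl, cwLoopA_step]
      have hne : (pre.length : Int) ≠ ((pre ++ a::b::r).length : Int) - 1 := by
        simp; omega
      rw [if_neg hne]
      have hga : (PySem.List.pyGet? (pre ++ a::b::r) (pre.length : Int)).getD ' ' = a := by
        rw [PySem.List.pyGet?_append_length]; rfl
      have hgb : (PySem.List.pyGet? (pre ++ a::b::r) ((pre.length : Int) + 1)).getD ' ' = b := by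
        have := PySem.List.pyGet?_append_right (pre := pre) (ys := a::b::r) (k := 1)
        push_cast at this ⊢
        rw [this]; rfl
      rw [hga, hgb]
      have hrec : cwLoopA (pre ++ a::b::r) (r.length + 1) ((pre.length : Int) + 1) true
          = cwScan ((b::r).map cwHandC) := by
        have h2 := ih (pre ++ [a])
        rw [List.append_assoc] at h2
        simpa using h2
      by_cases hLa : a ∈ cwLeft <;> by_cases hLb : b ∈ cwLeft <;>
        by_cases hRa : a ∈ cwRight <;> by_cases hRb : b ∈ cwRight <;>
        first
        | exact absurd hRa (cw_disj' a hLa)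
        | exact absurd hRb (cw_disj' b hLb)
        | simp [cwHandC, cwScan, hLa, hLb, hRa, hRb, hrec]

-- ===== VERDICT (by name: the statement is the Claim_ definition above) =====
theorem comfortable_word_spec : Claim_equal_comfortable_word := by
  intro word _
  unfold Spec_comfortable_word comfortable_word
  rw [cw_alt_eq_scan]
  simpa using cw_key word.toList []
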